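-- pv_equiv track=rewrite | github.com/nuclearcat/rs-linux-exporter | scripts/generate_grafana_panel.py | list_sections
-- ===== SOURCE A (Python) =====
-- from typing import Any, Dict, Iterable, List, Optional
--
-- def list_sections(schema: Dict[str, Any]) -> str:
--     counts: Dict[str, int] = {}
--     for entry in schema.get("metrics", []):
--         group = str(entry.get("group", ""))
--         counts[group] = counts.get(group, 0) + 1
--
--     lines = ["Available groups:"]
--     for group in sorted(counts):
--         lines.append(f"- {group}: {counts[group]}")
--     return "\n".join(lines)
-- ===== SOURCE B (Python) =====
-- def list_sections(schema):
--     keys = sorted(str(e.get("group", "")) for e in schema.get("metrics", []))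
--     lines = ["Available groups:"]
--     while keys:
--         g = keys[0]
--         same = 0
--         while same < len(keys) - 1 and keys[same + 1] == g:
--             same += 1
--         lines.append(f"- {g}: {same + 1}")
--         keys = keys[same + 1:]
--     return "\n".join(lines)
-- ===== Notes on version B (the rewrite author's own statement) =====
-- stated objective: alternative
-- what changed: Instead of accumulating counts in a dict and then looping over its sorted keys, B sorts the flat key list first and derives each group's count as the length of its run of equal adjacent elements in a single scan.
import Mathlib
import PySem

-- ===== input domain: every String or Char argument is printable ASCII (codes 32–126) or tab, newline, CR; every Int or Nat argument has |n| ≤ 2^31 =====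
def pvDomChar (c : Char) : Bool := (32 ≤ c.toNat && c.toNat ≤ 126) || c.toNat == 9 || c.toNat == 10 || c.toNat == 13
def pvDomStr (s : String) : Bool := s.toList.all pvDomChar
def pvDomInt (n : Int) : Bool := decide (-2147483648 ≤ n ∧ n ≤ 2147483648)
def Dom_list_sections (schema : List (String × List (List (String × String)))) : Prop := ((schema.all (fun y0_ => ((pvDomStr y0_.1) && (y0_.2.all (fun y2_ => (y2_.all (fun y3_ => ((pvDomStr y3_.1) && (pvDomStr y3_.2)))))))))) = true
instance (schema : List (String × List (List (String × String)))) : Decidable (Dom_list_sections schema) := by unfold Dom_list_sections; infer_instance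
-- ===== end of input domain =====

-- B sorts the key list first and emits each group with its run length in one scan,
-- instead of A's dict-count accumulation followed by a sorted-keys loop (alternative decomposition).
-- ===== PORT A =====
def list_sections (schema : List (String × List (List (String × String)))) : String :=
  let metrics := (PySem.Dict.mk schema).getD "metrics" []
  let counts := metrics.foldl (fun d entry =>
      let group := (PySem.Dict.mk entry).getD "group" ""
      d.insert group (d.getD group 0 + 1)) (PySem.Dict.empty : PySem.Dict String Int)
  let lines := (PySem.List.sorted (PySem.Dict.keys counts) (fun g => g) false).foldl
      (fun ls g => ls ++ ["- " ++ g ++ ": " ++ PySem.Int.toStr (counts.getD g 0)])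
      ["Available groups:"]
  PySem.Str.join "\n" lines

-- ===== PORT B =====
-- the outer 'while keys:' loop of Source B; 'same' is the inner scan counting equal successors,
-- 'keys = keys[same+1:]' is the drop.
def pvRunsB : List String → List String
  | [] => []
  | g :: rest =>
      let same := (rest.takeWhile (fun x => x == g)).length
      ("- " ++ g ++ ": " ++ PySem.Int.toStr ((same + 1 : Nat) : Int)) :: pvRunsB (rest.drop same)
  termination_by l => l.length
  decreasing_by simp

def list_sections_alt (schema : List (String × List (List (String × String)))) : String :=
  let keys := PySem.List.sorted
      (((PySem.Dict.mk schema).getD "metrics" []).map (fun e => (PySem.Dict.mk e).getD "group" ""))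
      (fun g => g) false
  PySem.Str.join "\n" ("Available groups:" :: pvRunsB keys)

-- ===== PRECONDITION & SPEC =====
def Spec_list_sections (schema : List (String × List (List (String × String)))) (out : String) : Prop := out = list_sections_alt schema
instance (schema : List (String × List (List (String × String)))) (out : String) : Decidable (Spec_list_sections schema out) := by unfold Spec_list_sections; infer_instance

-- ===== CLAIM (what is proved, stated in full; the proofs are below) =====
def Claim_equal_list_sections : Prop := ∀ (schema : List (String × List (List (String × String)))), Dom_list_sections schema → Spec_list_sections schema (list_sections schema)

-- ===== LEMMAS AND PROOFS =====

-- counting elements of a concatenation of replicate-blocks over distinct values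
lemma pv_count_flat (a : String) (c : String → Nat) :
    ∀ t : List String, t.Nodup →
      (t.flatMap fun g => List.replicate (c g) g).count a = if a ∈ t then c a else 0 := by
  intro t
  induction t with
  | nil => simp
  | cons g t ih =>
    intro hnd
    rcases List.nodup_cons.mp hnd with ⟨hg, hnd'⟩
    simp only [List.flatMap_cons, List.count_append, ih hnd', List.count_replicate, List.mem_cons]
    by_cases hag : a = g
    · subst hag; simp [hg]
    · simp [hag, Ne.symm hag]

-- a concatenation of constant blocks over strictly increasing values is ≤-sorted
lemma pv_flat_pairwise (c : String → Nat) :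
    ∀ t : List String, t.Pairwise (· < ·) →
      (t.flatMap fun g => List.replicate (c g) g).Pairwise (· ≤ ·) := by
  intro t
  induction t with
  | nil => simp
  | cons g t ih =>
    intro hp
    rcases List.pairwise_cons.mp hp with ⟨hlt, hp'⟩
    simp only [List.flatMap_cons]
    refine List.pairwise_append.mpr ⟨List.pairwise_replicate.mpr (by simp), ih hp', ?_⟩
    intro x hx y hy
    rcases List.eq_of_mem_replicate hx with rfl
    rcases List.mem_flatMap.mp hy with ⟨g', hg', hy'⟩
    rcases List.eq_of_mem_replicate hy' with rfl
    exact le_of_lt (hlt _ hg')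

-- the sorted key list is the concatenation of the replicate-blocks of its distinct values
lemma pv_sorted_eq_flat (keys : List String) :
    PySem.List.sorted keys (fun g => g) false
      = (PySem.List.sorted (PySem.Set.ofList keys) (fun g => g) false).flatMap
          (fun g => List.replicate (keys.count g) g) := by
  have hplt := PySem.List.sorted_ofList_pairwise_lt keys
  have hnd : (PySem.List.sorted (PySem.Set.ofList keys) (fun g => g) false).Nodup :=
    hplt.imp (fun h => ne_of_lt h)
  refine PySem.List.sorted_id_eq_of_perm_of_pairwise _ _ ?_ (pv_flat_pairwise _ _ hplt)
  refine List.perm_iff_count.mpr ?_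
  intro a
  rw [pv_count_flat a _ _ hnd]
  by_cases ha : a ∈ keys
  · simp [PySem.List.mem_sorted, PySem.Set.mem_ofList, ha]
  · simp [PySem.List.mem_sorted, PySem.Set.mem_ofList, ha, List.count_eq_zero_of_not_mem ha]

lemma pv_takeWhile_app (p : String → Bool) (l1 l2 : List String)
    (h1 : ∀ x ∈ l1, p x = true) (h2 : ∀ x ∈ l2, p x = false) :
    (l1 ++ l2).takeWhile p = l1 := by
  induction l1 with
  | nil =>
    cases l2 with
    | nil => simp
    | cons a l => simp [h2 a (by simp)]
  | cons a l ih =>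
    simp only [List.cons_append, List.takeWhile_cons, h1 a (by simp), if_true]
    rw [ih (fun x hx => h1 x (by simp [hx]))]

-- pvRunsB on such a concatenation emits exactly one line per distinct value
lemma pv_runs_flat (c : String → Nat) :
    ∀ t : List String, t.Pairwise (· < ·) → (∀ g ∈ t, 0 < c g) →
      pvRunsB (t.flatMap fun g => List.replicate (c g) g)
        = t.map (fun g => "- " ++ g ++ ": " ++ PySem.Int.toStr ((c g : Nat) : Int)) := by
  intro t
  induction t with
  | nil => simp [pvRunsB]
  | cons g t ih =>
    intro hp hpos
    rcases List.pairwise_cons.mp hp with ⟨hlt, hp'⟩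
    obtain ⟨n, hn⟩ : ∃ n, c g = n + 1 := ⟨c g - 1, by have := hpos g (by simp); omega⟩
    have hall : ∀ x ∈ t.flatMap fun g' => List.replicate (c g') g', (x == g) = false := by
      intro x hx
      rcases List.mem_flatMap.mp hx with ⟨g', hg', hx'⟩
      rcases List.eq_of_mem_replicate hx' with rfl
      exact beq_eq_false_iff_ne.mpr (ne_of_gt (hlt _ hg'))
    have htake : ((List.replicate n g ++ t.flatMap fun g' => List.replicate (c g') g').takeWhile
        (fun x => x == g)) = List.replicate n g :=
      pv_takeWhile_app _ _ _ (fun x hx => by rcases List.eq_of_mem_replicate hx with rfl; simp) hall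
    simp only [List.flatMap_cons, hn, List.replicate_succ, List.cons_append, pvRunsB, htake,
      List.length_replicate]
    rw [List.drop_left' (by simp), ih hp' (fun g' hg' => hpos g' (by simp [hg']))]
    simp [hn]

-- ===== VERDICT (by name: the statement is the Claim_ definition above) =====
theorem list_sections_spec : Claim_equal_list_sections := by
  intro schema _
  unfold Spec_list_sections list_sections list_sections_alt
  set ms := (PySem.Dict.mk schema).getD "metrics" [] with hms
  have hfold : ms.foldl (fun d entry =>
      let group := (PySem.Dict.mk entry).getD "group" ""
      d.insert group (d.getD group 0 + 1)) (PySem.Dict.empty : PySem.Dict String Int)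
      = PySem.Dict.counter (ms.map (fun e => (PySem.Dict.mk e).getD "group" "")) := by
    rw [← PySem.Dict.foldl_insert_getD_add_one_eq_counter, List.foldl_map]
  set keys := ms.map (fun e => (PySem.Dict.mk e).getD "group" "") with hkeys
  have hruns : pvRunsB (PySem.List.sorted keys (fun g => g) false)
      = (PySem.List.sorted (PySem.Set.ofList keys) (fun g => g) false).map
          (fun g => "- " ++ g ++ ": " ++ PySem.Int.toStr ((keys.count g : Nat) : Int)) := by
    rw [pv_sorted_eq_flat]
    refine pv_runs_flat _ _ (PySem.List.sorted_ofList_pairwise_lt keys) ?_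
    intro g hg
    have : g ∈ keys := by
      have := (PySem.List.mem_sorted _ _ _ _).mp hg
      simpa [PySem.Set.mem_ofList] using this
    exact List.count_pos_iff.mpr this
  simp only [hfold, PySem.Dict.keys_counter, PySem.Dict.getD_counter,
    PySem.List.foldl_append_singleton_eq_map, List.singleton_append, hruns]
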